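-- pv_equiv track=rewrite | github.com/semcod/swop | swop/manifests/generator.py | _camel_to_dot
-- ===== SOURCE A (Python) =====
-- from typing import Any, Dict, Iterable, List, Optional, Set, Tuple
--
-- def _camel_to_dot(name: str) -> str:
--     """``CreateCustomer`` -> ``create.customer``; leading verb becomes first token."""
--     out: List[str] = []
--     current: List[str] = []
--     for char in name:
--         if char.isupper() and current:
--             out.append("".join(current).lower())
--             current = [char]
--         else:
--             current.append(char)
--     if current:
--         out.append("".join(current).lower())
--     return ".".join(out)
-- ===== SOURCE B (Python) =====
-- def _camel_to_dot(name: str) -> str: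
--     idx = [i for i, c in enumerate(name) if i and c.isupper()]
--     bounds = [0] + idx + [len(name)]
--     return ".".join(name[a:b].lower() for a, b in zip(bounds, bounds[1:]))
-- ===== Notes on version B (the rewrite author's own statement) =====
-- stated objective: alternative
-- what changed: Replaces the char-by-char buffer accumulation with one pass collecting token-boundary indices followed by slicing the string between consecutive bounds.
import Mathlib
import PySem

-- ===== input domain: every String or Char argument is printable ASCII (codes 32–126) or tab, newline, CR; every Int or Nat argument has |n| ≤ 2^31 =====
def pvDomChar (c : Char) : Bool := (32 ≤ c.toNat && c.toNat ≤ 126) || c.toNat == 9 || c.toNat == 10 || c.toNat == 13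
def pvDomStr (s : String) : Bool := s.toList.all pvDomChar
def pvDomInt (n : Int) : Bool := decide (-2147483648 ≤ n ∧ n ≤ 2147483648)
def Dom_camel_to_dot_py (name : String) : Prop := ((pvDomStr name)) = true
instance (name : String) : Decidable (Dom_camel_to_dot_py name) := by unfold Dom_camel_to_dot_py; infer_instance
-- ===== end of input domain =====

-- ===== PORT A =====
-- A: accumulate chars into a buffer `current`; on an uppercase char with a nonempty
-- buffer, flush the lowercased buffer into `out`; finally join with '.'.
def camel_to_dot_py (name : String) : String :=
  let st := name.toList.foldl
    (fun (st : List (List Char) × List Char) ch =>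
      if PySem.Chars.isupper ch && !st.2.isEmpty then
        (st.1 ++ [PySem.Chars.lower st.2], [ch])
      else
        (st.1, st.2 ++ [ch]))
    ([], [])
  let out := if !st.2.isEmpty then st.1 ++ [PySem.Chars.lower st.2] else st.1
  String.mk (PySem.Chars.join ['.'] out)

-- ===== PORT B =====
-- B: one pass collecting boundary indices (i > 0 with an uppercase char), then
-- slice the string between consecutive bounds, lowercase each slice, join with '.'.
def camel_to_dot_py_alt (name : String) : String :=
  let cs := name.toList
  let idx : List Int := (PySem.List.enumerate cs).filterMap
    (fun p => if p.1 ≠ 0 ∧ PySem.Chars.isupper p.2 then some p.1 else none)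
  let bounds : List Int := (0 : Int) :: idx ++ [(cs.length : Int)]
  let parts := (bounds.zip bounds.tail).map
    (fun ab => PySem.Chars.lower (PySem.List.slice cs (some ab.1) (some ab.2)))
  String.mk (PySem.Chars.join ['.'] parts)

-- ===== PRECONDITION & SPEC =====
def Spec_camel_to_dot_py (name : String) (out : String) : Prop := out = camel_to_dot_py_alt name
instance (name : String) (out : String) : Decidable (Spec_camel_to_dot_py name out) := by unfold Spec_camel_to_dot_py; infer_instance

-- ===== CLAIM (what is proved, stated in full; the proofs are below) =====
def Claim_equal_camel_to_dot_py : Prop := ∀ (name : String), Dom_camel_to_dot_py name → Spec_camel_to_dot_py name (camel_to_dot_py name)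

-- ===== LEMMAS AND PROOFS =====

-- named forms of A's loop body and finalizer (definitionally equal to the port's)
def pvStep (st : List (List Char) × List Char) (ch : Char) : List (List Char) × List Char :=
  if PySem.Chars.isupper ch && !st.2.isEmpty then
    (st.1 ++ [PySem.Chars.lower st.2], [ch])
  else (st.1, st.2 ++ [ch])

def pvFin (st : List (List Char) × List Char) : List (List Char) :=
  if !st.2.isEmpty then st.1 ++ [PySem.Chars.lower st.2] else st.1

theorem pvA_eq (name : String) :
    camel_to_dot_py name
      = String.mk (PySem.Chars.join ['.'] (pvFin (name.toList.foldl pvStep ([], [])))) := rfl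

theorem pvB_eq (name : String) :
    camel_to_dot_py_alt name
      = String.mk (PySem.Chars.join ['.']
          ((((0 : Int) :: ((PySem.List.enumerate name.toList ((0 : Nat) : Int)).filterMap
                (fun p => if p.1 ≠ 0 ∧ PySem.Chars.isupper p.2 then some p.1 else none))
              ++ [(name.toList.length : Int)]).zip
            (((PySem.List.enumerate name.toList ((0 : Nat) : Int)).filterMap
                (fun p => if p.1 ≠ 0 ∧ PySem.Chars.isupper p.2 then some p.1 else none))
              ++ [(name.toList.length : Int)])).map
            (fun ab => PySem.Chars.lower (PySem.List.slice name.toList (some ab.1) (some ab.2))))) := rfl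

-- common spec: split a char list into segments starting at uppercase chars
def pvSeg (cur : List Char) : List Char → List (List Char)
  | [] => [cur]
  | c :: l => if PySem.Chars.isupper c then cur :: pvSeg [c] l else pvSeg (cur ++ [c]) l

-- absolute uppercase-boundary indices of l, whose first char sits at index k
def pvUidx (k : Nat) : List Char → List Nat
  | [] => []
  | c :: l => if k ≠ 0 ∧ PySem.Chars.isupper c then k :: pvUidx (k+1) l else pvUidx (k+1) l

-- chop cs at absolute positions js, starting at position p
def pvChop (cs : List Char) (p : Nat) : List Nat → List (List Char)
  | [] => [cs.drop p]
  | j :: js => (cs.drop p).take (j - p) :: pvChop cs j js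

theorem pvE (l : List Char) (k : Nat) :
    (PySem.List.enumerate l (k : Int)).filterMap
      (fun p => if p.1 ≠ 0 ∧ PySem.Chars.isupper p.2 then some p.1 else none)
    = (pvUidx k l).map Int.ofNat := by
  induction l generalizing k with
  | nil => simp [pvUidx, PySem.List.enumerate_nil]
  | cons c l ih =>
    have hk : ((k : Int) + 1) = ((k + 1 : Nat) : Int) := by push_cast; ring
    simp only [PySem.List.enumerate_cons, List.filterMap_cons, pvUidx, hk, ih]
    by_cases hu : PySem.Chars.isupper c
    · by_cases h0 : k = 0 <;> simp [h0, hu]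
    · simp [hu]

theorem pvZ (cs : List Char) (p : Nat) (js : List Nat) :
    ((((p : Int) :: js.map Int.ofNat ++ [(cs.length : Int)]).zip
        (js.map Int.ofNat ++ [(cs.length : Int)])).map
      (fun ab => PySem.List.slice cs (some ab.1) (some ab.2)))
    = pvChop cs p js := by
  induction js generalizing p with
  | nil =>
    simp only [List.map_nil, List.nil_append, List.singleton_append, List.zip_cons_cons,
      List.zip_nil_right, List.map_cons, List.map_nil, pvChop]
    rw [PySem.List.slice_toNat cs (Int.natCast_nonneg p) (Int.natCast_nonneg _)]
    simp [List.take_of_length_le]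
  | cons j js ih =>
    simp only [List.map_cons, List.cons_append, List.zip_cons_cons, List.map_cons, pvChop]
    rw [show Int.ofNat j = ((j : Nat) : Int) from rfl,
      PySem.List.slice_toNat cs (Int.natCast_nonneg p) (Int.natCast_nonneg j)]
    simp only [Int.toNat_natCast]
    exact congrArg₂ List.cons rfl (ih j)

theorem pvG (l : List Char) (cur : List Char) (cs : List Char) (p : Nat)
    (hc : cur ≠ []) (hd : cs.drop p = cur ++ l) :
    pvChop cs p (pvUidx (p + cur.length) l) = pvSeg cur l := by
  induction l generalizing cur p with
  | nil =>
    simp [pvUidx, pvChop, pvSeg, hd]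
  | cons c l ih =>
    have hlen : 0 < cur.length := List.length_pos_of_ne_nil hc
    have hne : p + cur.length ≠ 0 := by omega
    by_cases hu : PySem.Chars.isupper c
    · have hdrop : cs.drop (p + cur.length) = c :: l := by
        have h2 := congrArg (List.drop cur.length) hd
        rw [List.drop_drop, List.drop_left] at h2
        exact h2
      have h1 : pvUidx (p + cur.length) (c :: l) =
          (p + cur.length) :: pvUidx (p + cur.length + 1) l := by
        rw [pvUidx]; exact if_pos ⟨hne, hu⟩
      have ih' : pvChop cs (p + cur.length) (pvUidx (p + cur.length + 1) l) = pvSeg [c] l := by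
        have := ih [c] (p + cur.length) (by simp) hdrop
        simpa using this
      rw [h1, pvChop, ih', hd]
      have htake : (cur ++ c :: l).take (p + cur.length - p) = cur :=
        List.take_left' (by omega)
      rw [htake]
      simp [pvSeg, hu]
    · have h1 : pvUidx (p + cur.length) (c :: l) = pvUidx (p + cur.length + 1) l := by
        rw [pvUidx]; exact if_neg (fun h => hu h.2)
      have ih' : pvChop cs p (pvUidx (p + (cur ++ [c]).length) l) = pvSeg (cur ++ [c]) l :=
        ih (cur ++ [c]) p (by simp) (by rw [hd]; simp)
      have hL : p + (cur ++ [c]).length = p + cur.length + 1 := by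
        simp [List.length_append]; omega
      rw [hL] at ih'
      rw [h1, ih']
      simp [pvSeg, hu]

theorem pvA (l : List Char) (out : List (List Char)) (cur : List Char) (hc : cur ≠ []) :
    pvFin (l.foldl pvStep (out, cur)) = out ++ (pvSeg cur l).map PySem.Chars.lower := by
  induction l generalizing out cur with
  | nil => simp [pvSeg, pvFin, List.isEmpty_eq_false_iff.mpr hc]
  | cons c l ih =>
    have hcur : cur.isEmpty = false := List.isEmpty_eq_false_iff.mpr hc
    by_cases hu : PySem.Chars.isupper c
    · rw [List.foldl_cons, show pvStep (out, cur) c = (out ++ [PySem.Chars.lower cur], [c]) by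
        simp [pvStep, hu, hcur]]
      rw [ih (out ++ [PySem.Chars.lower cur]) [c] (by simp)]
      simp [pvSeg, hu]
    · rw [List.foldl_cons, show pvStep (out, cur) c = (out, cur ++ [c]) by
        simp [pvStep, hu]]
      rw [ih out (cur ++ [c]) (by simp)]
      simp [pvSeg, hu]

-- ===== VERDICT (by name: the statement is the Claim_ definition above) =====
theorem camel_to_dot_py_spec : Claim_equal_camel_to_dot_py := by
  intro name _
  show camel_to_dot_py name = camel_to_dot_py_alt name
  rw [pvA_eq, pvB_eq]
  cases h : name.toList with
  | nil => decide
  | cons c t =>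
    have hstep : pvStep ([], []) c = ([], [c]) := by simp [pvStep]
    rw [List.foldl_cons, hstep, pvA t [] [c] (by simp)]
    rw [pvE (c :: t) 0]
    have h0 : pvUidx 0 (c :: t) = pvUidx 1 t := by
      rw [pvUidx]; exact if_neg (by simp)
    rw [h0]
    have hz := congrArg (List.map PySem.Chars.lower) (pvZ (c :: t) 0 (pvUidx 1 t))
    rw [List.map_map] at hz
    simp only [Function.comp_def, Nat.cast_zero] at hz
    rw [hz]
    have hg := pvG t [c] (c :: t) 0 (by simp) (by simp)
    simp only [List.length_cons, List.length_nil, Nat.zero_add] at hg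
    rw [hg]
    simp
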